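-- pv_equiv track=rewrite | github.com/mbh038/PE | PE_0387/PE_0387.py | isRTHarshad
-- ===== SOURCE A (Python) =====
-- def isRTHarshad(n):
--
--     if n<10:
--         return True
--     digits=[int(digit) for digit in str(n)]
--
--     while n>10:
--         if not n%sum(digits):
--             digits.pop()
--             n//=10
--         else:
--             return False
--     return True
-- ===== SOURCE B (Python) =====
-- def isRTHarshad(n):
--     if n < 10:
--         return True
--     s = sum(int(d) for d in str(n))
--     return n % s == 0 and isRTHarshad(n // 10)
-- ===== Notes on version B (the rewrite author's own statement) =====
-- stated objective: simpler
-- what changed: Replaces the while-loop that maintains a mutable popped digit list with direct recursion on the successive right-truncations, recomputing the digit sum of the current number at each level (no list state).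
import Mathlib
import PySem

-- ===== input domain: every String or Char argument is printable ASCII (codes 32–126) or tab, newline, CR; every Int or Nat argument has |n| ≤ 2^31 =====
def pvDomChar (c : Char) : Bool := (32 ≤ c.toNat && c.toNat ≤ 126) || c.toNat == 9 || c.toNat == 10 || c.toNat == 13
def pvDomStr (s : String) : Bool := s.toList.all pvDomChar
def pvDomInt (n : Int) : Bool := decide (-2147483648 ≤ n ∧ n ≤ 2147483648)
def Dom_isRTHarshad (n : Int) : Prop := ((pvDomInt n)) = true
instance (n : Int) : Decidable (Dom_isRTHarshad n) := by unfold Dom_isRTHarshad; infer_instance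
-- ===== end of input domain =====

-- B replaces A's while-loop over a mutable popped digit list by direct recursion on the
-- right-truncations, recomputing the digit sum of the current number at each level (simpler, no list state).

-- ===== PORT A =====
-- termination helper for the while-loop: n//10 shrinks while n > 10
theorem pvDiv10_lt (n : Int) (h : 10 ≤ n) : (PySem.Int.floordiv n 10).toNat < n.toNat := by
  rw [PySem.Int.floordiv_eq_ediv_of_pos (by norm_num)]
  omega

-- the 'while n>10' loop of A, state = (n, digits)
def isRTHarshadLoop (n : Int) (digits : List Int) : Bool :=
  if _h : n > 10 then
    if PySem.Int.mod n digits.sum = 0 then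
      isRTHarshadLoop (PySem.Int.floordiv n 10) digits.dropLast
    else false
  else true
termination_by n.toNat
decreasing_by exact pvDiv10_lt n (by omega)

def isRTHarshad (n : Int) : Bool :=
  if n < 10 then true
  else
    -- int(digit) for a single decimal-digit char: ofChars? always returns some there, so getD 0 is exact
    isRTHarshadLoop n ((PySem.Int.toStr n).toList.map (fun c => (PySem.Int.ofChars? [c]).getD 0))

-- ===== PORT B =====
def isRTHarshad_alt (n : Int) : Bool :=
  if _h : n < 10 then true
  else
    -- s = sum(int(d) for d in str(n)); int(d) on a digit char: ofChars? is always some, getD 0 exact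
    let s := ((PySem.Int.toStr n).toList.map (fun c => (PySem.Int.ofChars? [c]).getD 0)).sum
    (PySem.Int.mod n s == 0) && isRTHarshad_alt (PySem.Int.floordiv n 10)
termination_by n.toNat
decreasing_by exact pvDiv10_lt n (by omega)

-- ===== PRECONDITION & SPEC =====
def Spec_isRTHarshad (n : Int) (out : Bool) : Prop := out = isRTHarshad_alt n
instance (n : Int) (out : Bool) : Decidable (Spec_isRTHarshad n out) := by unfold Spec_isRTHarshad; infer_instance

-- ===== CLAIM (what is proved, stated in full; the proofs are below) =====
def Claim_equal_isRTHarshad : Prop := ∀ (n : Int), Dom_isRTHarshad n → Spec_isRTHarshad n (isRTHarshad n)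

-- ===== LEMMAS AND PROOFS =====

def pvDigits (n : Int) : List Int :=
  (PySem.Int.toStr n).toList.map (fun c => (PySem.Int.ofChars? [c]).getD 0)

-- accumulator lemma for Nat.toDigitsCore
theorem pvToDigitsCore_acc (fuel n : Nat) (ds : List Char) :
    Nat.toDigitsCore 10 fuel n ds = Nat.toDigitsCore 10 fuel n [] ++ ds := by
  induction fuel generalizing n ds with
  | zero => simp [Nat.toDigitsCore]
  | succ f ih =>
    simp only [Nat.toDigitsCore]
    by_cases h : n / 10 = 0
    · simp [h]
    · simp only [h, if_false]
      rw [ih (n / 10) [Nat.digitChar (n % 10)], ih (n / 10) (Nat.digitChar (n % 10) :: ds)]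
      simp

-- fuel irrelevance for Nat.toDigitsCore (enough fuel)
theorem pvToDigitsCore_fuel (f1 f2 n : Nat) (ds : List Char) (h1 : n < f1) (h2 : n < f2) :
    Nat.toDigitsCore 10 f1 n ds = Nat.toDigitsCore 10 f2 n ds := by
  induction f1 generalizing f2 n ds with
  | zero => omega
  | succ g1 ih =>
    cases f2 with
    | zero => omega
    | succ g2 =>
      simp only [Nat.toDigitsCore]
      by_cases h : n / 10 = 0
      · simp [h]
      · simp only [h, if_false]
        have hn : 0 < n := by omega
        have : n / 10 < n := Nat.div_lt_self hn (by norm_num)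
        exact ih g2 (n / 10) _ (by omega) (by omega)

-- peel the last decimal digit
theorem pvToDigits_peel (n : Nat) (h : 10 ≤ n) :
    Nat.toDigits 10 n = Nat.toDigits 10 (n / 10) ++ [Nat.digitChar (n % 10)] := by
  unfold Nat.toDigits
  conv_lhs => rw [show n + 1 = (n) + 1 from rfl]
  rw [show Nat.toDigitsCore 10 (n + 1) n [] =
      if n / 10 = 0 then [Nat.digitChar (n % 10)]
      else Nat.toDigitsCore 10 n (n / 10) [Nat.digitChar (n % 10)] from by
    simp only [Nat.toDigitsCore]]
  have h0 : ¬ n / 10 = 0 := by omega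
  simp only [h0, if_false]
  rw [pvToDigitsCore_acc]
  have : n / 10 < n := Nat.div_lt_self (by omega) (by norm_num)
  rw [pvToDigitsCore_fuel n (n / 10 + 1) (n / 10) [] (by omega) (by omega)]

-- the digit list of n, for n ≥ 10, is the digit list of n//10 plus the last digit
theorem pvDigits_peel (n : Int) (h : 10 ≤ n) :
    pvDigits n = pvDigits (PySem.Int.floordiv n 10) ++
      [(PySem.Int.ofChars? [Nat.digitChar (n.toNat % 10)]).getD 0] := by
  have hq : PySem.Int.floordiv n 10 = n / 10 := PySem.Int.floordiv_eq_ediv_of_pos (by norm_num)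
  unfold pvDigits
  rw [hq]
  simp only [PySem.Int.toList_toStr, PySem.Int.toChars]
  have hn : ¬ n < 0 := by omega
  have hq' : ¬ n / 10 < 0 := by omega
  simp only [hn, hq', if_false]
  have ht : (n / 10).toNat = n.toNat / 10 := by omega
  rw [ht, pvToDigits_peel n.toNat (by omega), List.map_append]
  simp

theorem pvDigits_dropLast (n : Int) (h : 10 ≤ n) :
    (pvDigits n).dropLast = pvDigits (PySem.Int.floordiv n 10) := by
  rw [pvDigits_peel n h, List.dropLast_concat]

-- the loop of A, started with the digit list of n, equals B's recursion (n ≥ 10)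
theorem pvLoop_eq_alt_aux (m : Nat) : ∀ (n : Int), n.toNat ≤ m → 10 ≤ n →
    isRTHarshadLoop n (pvDigits n) = isRTHarshad_alt n := by
  induction m with
  | zero => intro n hm h; omega
  | succ m ih =>
  intro n hm h
  rcases eq_or_lt_of_le h with h10 | hgt
  · -- n = 10
    have : n = 10 := h10.symm
    subst this
    rw [isRTHarshadLoop]
    simp only [show ¬ (10:Int) > 10 from by omega, dite_false]
    rw [isRTHarshad_alt]
    simp only [show ¬(10 : Int) < 10 from by omega]
    rw [isRTHarshad_alt]
    norm_num [PySem.Int.toStr, PySem.Int.toChars, PySem.Int.mod, PySem.Int.floordiv,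
      PySem.Int.ofChars?, String.ofList]
    decide
  · -- n > 10
    rw [isRTHarshadLoop]
    simp only [show n > 10 from hgt, dite_true]
    rw [isRTHarshad_alt]
    simp only [show ¬n < 10 from by omega]
    show _ = ((PySem.Int.mod n (pvDigits n).sum == 0) && isRTHarshad_alt (PySem.Int.floordiv n 10))
    by_cases hmod : PySem.Int.mod n (pvDigits n).sum = 0
    · simp only [hmod, if_true, beq_self_eq_true, Bool.true_and]
      rw [pvDigits_dropLast n h]
      set q := PySem.Int.floordiv n 10 with hq
      have hqe : q = n / 10 := by rw [hq]; exact PySem.Int.floordiv_eq_ediv_of_pos (by norm_num)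
      by_cases hq10 : 10 ≤ q
      · exact ih q (by omega) hq10
      · -- q < 10: loop exits with true, alt returns true
        rw [isRTHarshadLoop]
        simp only [show ¬ q > 10 from by omega, dite_false]
        rw [isRTHarshad_alt]
        simp [show q < 10 from by omega]
    · simp only [hmod, if_false]
      rw [show (PySem.Int.mod n (pvDigits n).sum == 0) = false from by
        simp [beq_eq_false_iff_ne, hmod]]
      simp

-- ===== VERDICT (by name: the statement is the Claim_ definition above) =====
theorem isRTHarshad_spec : Claim_equal_isRTHarshad := by
  intro n _
  unfold Spec_isRTHarshad
  by_cases h : n < 10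
  · rw [isRTHarshad, isRTHarshad_alt]
    simp [h]
  · rw [isRTHarshad]
    simp only [h, if_false]
    exact pvLoop_eq_alt_aux n.toNat n (le_refl _) (by omega)
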